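-- pv_equiv track=rewrite | github.com/Daar543/TimetableProcessor | Map_Visualization/StopOrdering.py | FindSubsequenceRemainder
-- ===== SOURCE A (Python) =====
-- from typing import List, Any, TextIO, Dict, Tuple
--
-- def FindSubsequenceRemainder(sequence: List[Any], subsequence: List[Any]) -> List[Any]:
--     """!
--     @brief Find remainder of a sequence after removing a subsequence
--     @param sequence List of elements
--     @param subsequence Subsequence to be removed
--     @return Remainder of the sequence
--     """
--     if len(subsequence) == 0:
--         return sequence
--     if len(sequence) == 0:
--         return []
--     result = []
--     i = 0
--     for j, element in enumerate(sequence):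
--         if element == subsequence[i]:
--             i += 1
--             if i == len(subsequence):
--                 result += sequence[j + 1:]
--                 break
--         else:
--             result.append(element)
--     return result
-- ===== SOURCE B (Python) =====
-- from typing import List, Any
--
-- def FindSubsequenceRemainder(sequence: List[Any], subsequence: List[Any]) -> List[Any]:
--     if len(subsequence) == 0:
--         return sequence
--     if len(sequence) == 0:
--         return []
--     remove = set()
--     i = 0
--     for j, element in enumerate(sequence):
--         if i < len(subsequence) and element == subsequence[i]:
--             remove.add(j)
--             i += 1
--     return [element for j, element in enumerate(sequence) if j not in remove]
-- ===== Notes on version B (the rewrite author's own statement) =====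
-- stated objective: alternative
-- what changed: Replaces A's single append-as-you-go loop with early break and tail-slice splice by two passes: one pass collects the set of matched indices, a second pass filters the sequence by index membership.
import Mathlib
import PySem

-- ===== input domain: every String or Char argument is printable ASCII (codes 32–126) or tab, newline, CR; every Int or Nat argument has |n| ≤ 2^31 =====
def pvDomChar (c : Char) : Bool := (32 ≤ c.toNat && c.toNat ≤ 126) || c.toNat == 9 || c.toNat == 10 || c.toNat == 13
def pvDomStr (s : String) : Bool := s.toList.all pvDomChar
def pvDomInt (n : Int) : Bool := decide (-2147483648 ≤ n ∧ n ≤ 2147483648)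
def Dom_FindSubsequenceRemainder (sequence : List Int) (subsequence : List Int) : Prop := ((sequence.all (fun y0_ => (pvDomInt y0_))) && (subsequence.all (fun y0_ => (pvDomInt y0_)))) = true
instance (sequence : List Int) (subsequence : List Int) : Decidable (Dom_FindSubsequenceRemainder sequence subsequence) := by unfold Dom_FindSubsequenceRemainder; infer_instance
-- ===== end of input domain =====

-- B replaces A's one-pass append/early-break/tail-splice loop by an index-collecting pass
-- followed by a filtering pass (alternative decomposition, same O(n) cost).

-- ===== PORT A =====
-- the `for j, element in enumerate(sequence)` loop as structural recursion over the
-- remaining sequence; `sequence[j+1:]` on break is exactly the remaining tail `rest`.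
-- `subsequence[i]` is `(pyGet? …).getD 0`: the loop breaks as soon as i reaches
-- len(subsequence), so the index is always in range and the default is never used.
def pvGoA (subsequence : List Int) (i : Int) : List Int → List Int
  | [] => []
  | el :: rest =>
      if el = (PySem.List.pyGet? subsequence i).getD 0 then
        if i + 1 = (subsequence.length : Int) then rest
        else pvGoA subsequence (i + 1) rest
      else el :: pvGoA subsequence i rest

def FindSubsequenceRemainder (sequence : List Int) (subsequence : List Int) : List Int :=
  if subsequence.length = 0 then sequence
  else if sequence.length = 0 then []
  else pvGoA subsequence 0 sequence

-- ===== PORT B =====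
-- first pass of Source B: the loop over enumerate(sequence) emitting the matched indices
-- (each emitted j is fresh, so the emitted list is exactly the Python set `remove`).
-- The `i < len(subsequence)` guard makes the pyGet? default unreachable.
def pvCollectB (subsequence : List Int) (i : Int) (j : Int) : List Int → List Int
  | [] => []
  | el :: rest =>
      if i < (subsequence.length : Int) ∧ el = (PySem.List.pyGet? subsequence i).getD 0 then
        j :: pvCollectB subsequence (i + 1) (j + 1) rest
      else pvCollectB subsequence i (j + 1) rest

def FindSubsequenceRemainder_alt (sequence : List Int) (subsequence : List Int) : List Int :=
  if subsequence.length = 0 then sequence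
  else if sequence.length = 0 then []
  else
    let remove := pvCollectB subsequence 0 0 sequence
    ((PySem.List.enumerate sequence).filter (fun p => !(remove.contains p.1))).map (fun p => p.2)

-- ===== PRECONDITION & SPEC =====
def Spec_FindSubsequenceRemainder (sequence : List Int) (subsequence : List Int) (out : List Int) : Prop := out = FindSubsequenceRemainder_alt sequence subsequence
instance (sequence : List Int) (subsequence : List Int) (out : List Int) : Decidable (Spec_FindSubsequenceRemainder sequence subsequence out) := by unfold Spec_FindSubsequenceRemainder; infer_instance

-- ===== CLAIM (what is proved, stated in full; the proofs are below) =====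
def Claim_equal_FindSubsequenceRemainder : Prop := ∀ (sequence : List Int) (subsequence : List Int), Dom_FindSubsequenceRemainder sequence subsequence → Spec_FindSubsequenceRemainder sequence subsequence (FindSubsequenceRemainder sequence subsequence)

-- ===== LEMMAS AND PROOFS =====

-- every index emitted by the collecting pass is ≥ the starting index j
theorem mem_pvCollectB_ge (subsequence : List Int) :
    ∀ (seq : List Int) (i j m : Int), m ∈ pvCollectB subsequence i j seq → j ≤ m := by
  intro seq
  induction seq with
  | nil => intro i j m h; simp [pvCollectB] at h
  | cons el rest ih =>
      intro i j m h
      simp only [pvCollectB] at h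
      split_ifs at h with hc
      · rcases List.mem_cons.mp h with h | h
        · omega
        · have := ih (i + 1) (j + 1) m h; omega
      · have := ih i (j + 1) m h; omega

-- once i has reached len(subsequence), the collecting pass emits nothing
theorem pvCollectB_done (subsequence : List Int) :
    ∀ (seq : List Int) (i j : Int), ¬ i < (subsequence.length : Int) →
      pvCollectB subsequence i j seq = [] := by
  intro seq
  induction seq with
  | nil => intro i j _; rfl
  | cons el rest ih =>
      intro i j hi
      simp only [pvCollectB]
      rw [if_neg (by tauto)]
      exact ih i (j + 1) hi

-- filtering with a remove-set whose members all lie below the enumeration start keeps everything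
theorem filter_keep_all (seq : List Int) :
    ∀ (k : Int) (R : List Int), (∀ m ∈ R, m < k) →
      ((PySem.List.enumerate seq k).filter (fun p => !(R.contains p.1))).map (fun p => p.2) = seq := by
  induction seq with
  | nil => intro k R _; simp [PySem.List.enumerate_nil]
  | cons el rest ih =>
      intro k R hR
      rw [PySem.List.enumerate_cons]
      have hk : R.contains k = false := by
        by_contra h
        have : k ∈ R := by
          simpa using List.contains_iff_mem.mp (by simpa using h)
        exact absurd (hR k this) (by omega)
      simp only [List.filter_cons, hk, Bool.not_false, if_true, List.map_cons]
      rw [ih (k + 1) R (fun m hm => by have := hR m hm; omega)]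

-- main invariant: while i < len(subsequence), B's collect-then-filter on the remaining
-- sequence (enumerated from j) computes exactly A's loop on the remaining sequence
theorem main_inv (subsequence : List Int) :
    ∀ (seq : List Int) (i j : Int), i < (subsequence.length : Int) →
      ((PySem.List.enumerate seq j).filter
          (fun p => !((pvCollectB subsequence i j seq).contains p.1))).map (fun p => p.2)
        = pvGoA subsequence i seq := by
  intro seq
  induction seq with
  | nil => intro i j _; simp [pvCollectB, pvGoA, PySem.List.enumerate_nil]
  | cons el rest ih =>
      intro i j hi
      rw [PySem.List.enumerate_cons]
      simp only [pvCollectB, pvGoA]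
      by_cases heq : el = (PySem.List.pyGet? subsequence i).getD 0
      · rw [if_pos ⟨hi, heq⟩, if_pos heq]
        have hhead : ((j :: pvCollectB subsequence (i + 1) (j + 1) rest).contains j) = true := by
          simp
        simp only [List.filter_cons, hhead, Bool.not_true]
        by_cases hdone : i + 1 = (subsequence.length : Int)
        · rw [if_pos hdone]
          rw [pvCollectB_done subsequence rest (i + 1) (j + 1) (by omega)]
          exact filter_keep_all rest (j + 1) [j] (by intro m hm; simp at hm; omega)
        · rw [if_neg hdone]
          have hcong :
              (PySem.List.enumerate rest (j + 1)).filter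
                (fun p => !((j :: pvCollectB subsequence (i + 1) (j + 1) rest).contains p.1))
              = (PySem.List.enumerate rest (j + 1)).filter
                (fun p => !((pvCollectB subsequence (i + 1) (j + 1) rest).contains p.1)) := by
            apply List.filter_congr
            intro p hp
            rcases (PySem.List.mem_enumerate_iff rest (j + 1) p).mp hp with ⟨k, hk, rfl⟩
            have hne : (j + 1 + (k : Int)) ≠ j := by omega
            simp [hne]
          rw [hcong]
          exact ih (i + 1) (j + 1) (by omega)
      · rw [if_neg (by tauto), if_neg heq]
        have hhead : ((pvCollectB subsequence i (j + 1) rest).contains j) = false := by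
          by_contra h
          have hj : j ∈ pvCollectB subsequence i (j + 1) rest := by
            simpa using List.contains_iff_mem.mp (by simpa using h)
          have := mem_pvCollectB_ge subsequence rest i (j + 1) j hj
          omega
        simp only [List.filter_cons, hhead, Bool.not_false, if_true, List.map_cons]
        rw [ih i (j + 1) hi]

-- ===== VERDICT (by name: the statement is the Claim_ definition above) =====
theorem FindSubsequenceRemainder_spec : Claim_equal_FindSubsequenceRemainder := by
  intro sequence subsequence _
  unfold Spec_FindSubsequenceRemainder FindSubsequenceRemainder FindSubsequenceRemainder_alt
  by_cases hsub : subsequence.length = 0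
  · rw [if_pos hsub, if_pos hsub]
  · rw [if_neg hsub, if_neg hsub]
    by_cases hseq : sequence.length = 0
    · rw [if_pos hseq, if_pos hseq]
    · rw [if_neg hseq, if_neg hseq]
      exact (main_inv subsequence sequence 0 0 (by omega)).symm
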